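-- pv_equiv track=rewrite | github.com/MaxOpperman/Lehmer | path_operations.py | createSquareTube
-- ===== SOURCE A (Python) =====
-- from typing import List, Tuple
--
-- def createSquareTube(path: List[tuple], u: tuple, v: tuple):
--     # interleave the elements of the four copies of the path list
--     temp = [item for sublist in zip(*([path]*4)) for item in sublist]
--     uu = u + u
--     uv = u + v
--     vu = v + u
--     vv = v + v
--     module1 = [uu, uv, vv, vu, vu, vv, uv, uu]
--     module2 = [uu, uv, vv, vu, vu, uu, uv, vv]
--
--     # Combine the path with modules based on the index
--     result = [item + module1[i % 8] for i, item in enumerate(temp[:-8])] +\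
--              [item + module2[i % 8] for i, item in enumerate(temp[-8:])]
--     return result
-- ===== SOURCE B (Python) =====
-- def createSquareTube(path, u, v):
--     # Closed form: each path element contributes one block of four outputs.
--     # Elements before the last two alternate quads qA/qB by index parity;
--     # the second-to-last gets qA again and the last gets the re-phased qC.
--     uu, uv, vu, vv = u + u, u + v, v + u, v + v
--     qA = [uu, uv, vv, vu]
--     qB = [vu, vv, uv, uu]
--     qC = [vu, uu, uv, vv]
--     n = len(path)
--     out = []
--     for j, p in enumerate(path):
--         if j == n - 1 and n >= 2:
--             q = qC
--         elif j == n - 2 or j == n - 1: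
--             q = qA
--         else:
--             q = qA if j % 2 == 0 else qB
--         for m in q:
--             out.append(p + m)
--     return out
-- ===== Notes on version B (the rewrite author's own statement) =====
-- stated objective: simpler
-- what changed: B replaces A's flattened 4x temp list, the two 8-entry module tables and the mod-8 slice indexing by a derived closed form: each path element contributes one block of four outputs, chosen from three 4-entry quads by index parity and last-two-position.
import Mathlib
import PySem

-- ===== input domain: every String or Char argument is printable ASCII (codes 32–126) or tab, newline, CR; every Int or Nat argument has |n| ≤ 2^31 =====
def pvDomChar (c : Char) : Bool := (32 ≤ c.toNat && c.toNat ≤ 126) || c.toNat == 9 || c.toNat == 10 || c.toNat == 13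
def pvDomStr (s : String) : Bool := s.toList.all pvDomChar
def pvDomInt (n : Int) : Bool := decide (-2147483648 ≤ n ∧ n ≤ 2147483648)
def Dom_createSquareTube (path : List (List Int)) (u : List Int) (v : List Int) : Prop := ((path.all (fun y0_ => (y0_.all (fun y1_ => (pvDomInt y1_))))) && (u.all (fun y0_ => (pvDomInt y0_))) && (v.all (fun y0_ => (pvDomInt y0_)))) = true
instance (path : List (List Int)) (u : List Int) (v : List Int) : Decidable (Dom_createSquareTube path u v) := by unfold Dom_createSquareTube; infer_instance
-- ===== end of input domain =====

-- B replaces A's flattened `temp`, the two 8-entry module tables and the mod-8 indexing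
-- by a closed form: one 4-entry quad per path element, chosen by parity / last-two position
-- (objective: simpler).

-- ===== PORT A =====
def createSquareTube (path : List (List Int)) (u : List Int) (v : List Int) : List (List Int) :=
  -- zip(*([path]*4)) yields one quadruple per path element; the comprehension flattens it,
  -- so temp repeats each element of path four times (exact)
  let temp := (path.map (fun p => [p, p, p, p])).flatten
  let uu := u ++ u
  let uv := u ++ v
  let vu := v ++ u
  let vv := v ++ v
  let module1 := [uu, uv, vv, vu, vu, vv, uv, uu]
  let module2 := [uu, uv, vv, vu, vu, uu, uv, vv]
  ((PySem.List.enumerate (PySem.List.slice temp none (some (-8)))).map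
      (fun q => q.2 ++ PySem.List.pyGetD module1 (PySem.Int.mod q.1 8) []))
  ++ ((PySem.List.enumerate (PySem.List.slice temp (some (-8)) none)).map
      (fun q => q.2 ++ PySem.List.pyGetD module2 (PySem.Int.mod q.1 8) []))

-- ===== PORT B =====
def createSquareTube_alt (path : List (List Int)) (u : List Int) (v : List Int) : List (List Int) :=
  let uu := u ++ u
  let uv := u ++ v
  let vu := v ++ u
  let vv := v ++ v
  let qA := [uu, uv, vv, vu]
  let qB := [vu, vv, uv, uu]
  let qC := [vu, uu, uv, vv]
  let n : Int := path.length
  (PySem.List.enumerate path).foldl (fun out jp =>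
    let q := if jp.1 = n - 1 ∧ 2 ≤ n then qC
             else if jp.1 = n - 2 ∨ jp.1 = n - 1 then qA
             else if PySem.Int.mod jp.1 2 = 0 then qA else qB
    q.foldl (fun out m => out ++ [jp.2 ++ m]) out) []

-- ===== PRECONDITION & SPEC =====
def Spec_createSquareTube (path : List (List Int)) (u : List Int) (v : List Int) (out : List (List Int)) : Prop := out = createSquareTube_alt path u v
instance (path : List (List Int)) (u : List Int) (v : List Int) (out : List (List Int)) : Decidable (Spec_createSquareTube path u v out) := by unfold Spec_createSquareTube; infer_instance

-- ===== CLAIM (what is proved, stated in full; the proofs are below) =====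
def Claim_equal_createSquareTube : Prop := ∀ (path : List (List Int)) (u : List Int) (v : List Int), Dom_createSquareTube path u v → Spec_createSquareTube path u v (createSquareTube path u v)

-- ===== LEMMAS AND PROOFS =====

-- the per-pair block of eight outputs (module1's full cycle)
def pvBlock (u v a b : List Int) : List (List Int) :=
  [a ++ (u ++ u), a ++ (u ++ v), a ++ (v ++ v), a ++ (v ++ u),
   b ++ (v ++ u), b ++ (v ++ v), b ++ (u ++ v), b ++ (u ++ u)]

-- B's four outputs for the enumerated element jp of a path of length n
def pvQ (u v : List Int) (n : Int) (jp : Int × List Int) : List (List Int) :=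
  (if jp.1 = n - 1 ∧ 2 ≤ n then [v++u, u++u, u++v, v++v]
   else if jp.1 = n - 2 ∨ jp.1 = n - 1 then [u++u, u++v, v++v, v++u]
   else if PySem.Int.mod jp.1 2 = 0 then [u++u, u++v, v++v, v++u]
   else [v++u, v++v, u++v, u++u]).map (fun m => jp.2 ++ m)

lemma temp_len (path : List (List Int)) :
    ((path.map (fun p => [p, p, p, p])).flatten).length = 4 * path.length := by
  induction path with
  | nil => rfl
  | cons a t ih => simp [ih]; omega

-- enumerate distributes over append
lemma enum_append {α : Type} (xs ys : List α) (s : Int) :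
    PySem.List.enumerate (xs ++ ys) s
      = PySem.List.enumerate xs s ++ PySem.List.enumerate ys (s + xs.length) := by
  induction xs generalizing s with
  | nil => simp [PySem.List.enumerate_nil]
  | cons a t ih =>
      simp [PySem.List.enumerate_cons, ih (s + 1)]
      ring_nf

lemma mod8_shift (x : Int) : PySem.Int.mod (x + 8) 8 = PySem.Int.mod x 8 := by
  rw [PySem.Int.mod_eq_emod_of_pos (by omega), PySem.Int.mod_eq_emod_of_pos (by omega)]
  omega

-- the module comprehensions only see the index mod 8, so a start shift of 8 is invisible
lemma map_mod8_shift (m : List (List Int)) (L : List (List Int)) (s : Int) :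
    (PySem.List.enumerate L (s + 8)).map
        (fun q => q.2 ++ PySem.List.pyGetD m (PySem.Int.mod q.1 8) [])
      = (PySem.List.enumerate L s).map
        (fun q => q.2 ++ PySem.List.pyGetD m (PySem.Int.mod q.1 8) []) := by
  induction L generalizing s with
  | nil => simp [PySem.List.enumerate_nil]
  | cons a t ih =>
      simp only [PySem.List.enumerate_cons, List.map_cons]
      rw [mod8_shift s]
      have h := ih (s + 1)
      rw [show s + 8 + 1 = s + 1 + 8 by ring, h]

lemma map_mod8_shift0 (m : List (List Int)) (L : List (List Int)) :
    (PySem.List.enumerate L 8).map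
        (fun q => q.2 ++ PySem.List.pyGetD m (PySem.Int.mod q.1 8) [])
      = (PySem.List.enumerate L 0).map
        (fun q => q.2 ++ PySem.List.pyGetD m (PySem.Int.mod q.1 8) []) := by
  have h := map_mod8_shift m L 0
  rw [show (0:Int) + 8 = 8 by ring] at h
  exact h

-- A peels two leading elements when at least two remain afterwards
lemma A_step (u v a b : List Int) (rest : List (List Int)) (h : 2 ≤ rest.length) :
    createSquareTube (a :: b :: rest) u v = pvBlock u v a b ++ createSquareTube rest u v := by
  have hT := temp_len rest
  simp only [createSquareTube]
  have htemp : (((a :: b :: rest).map (fun p => [p, p, p, p])).flatten)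
      = [a, a, a, a, b, b, b, b] ++ ((rest.map (fun p => [p, p, p, p])).flatten) := by
    simp
  rw [htemp]
  rw [PySem.List.slice_to_neg_ofNat _ 8 (by norm_num),
      PySem.List.slice_to_neg_ofNat _ 8 (by norm_num),
      PySem.List.slice_from_neg_ofNat _ 8 (by norm_num),
      PySem.List.slice_from_neg_ofNat _ 8 (by norm_num)]
  have hlenTot : ([a, a, a, a, b, b, b, b] ++ ((rest.map (fun p => [p, p, p, p])).flatten)).length - 8
      = 4 * rest.length := by
    simp [hT]
  rw [hlenTot, hT]
  have htake : ([a, a, a, a, b, b, b, b] ++ ((rest.map (fun p => [p, p, p, p])).flatten)).take (4 * rest.length)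
      = [a, a, a, a, b, b, b, b] ++ ((rest.map (fun p => [p, p, p, p])).flatten).take (4 * rest.length - 8) := by
    rw [List.take_append]
    congr 1
    exact List.take_of_length_le (by simp; omega)
  have hdrop : ([a, a, a, a, b, b, b, b] ++ ((rest.map (fun p => [p, p, p, p])).flatten)).drop (4 * rest.length)
      = ((rest.map (fun p => [p, p, p, p])).flatten).drop (4 * rest.length - 8) := by
    rw [List.drop_append]
    have h8 : ([a, a, a, a, b, b, b, b] : List (List Int)).drop (4 * rest.length) = [] := by
      apply List.drop_eq_nil_of_le
      simp; omega
    rw [h8]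
    simp
  rw [htake, hdrop, enum_append, List.map_append]
  have hs : (0 : Int) + (([a, a, a, a, b, b, b, b] : List (List Int)).length : Int) = 8 := by
    norm_num
  rw [hs, map_mod8_shift0]
  have hhead : (PySem.List.enumerate [a, a, a, a, b, b, b, b] 0).map
      (fun q => q.2 ++ PySem.List.pyGetD [u++u, u++v, v++v, v++u, v++u, v++v, u++v, u++u] (PySem.Int.mod q.1 8) [])
      = pvBlock u v a b := by
    rfl
  rw [hhead, List.append_assoc]

-- the inner for-loop over a quad appends its map
lemma foldl_quad (p : List Int) (q acc : List (List Int)) :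
    q.foldl (fun out m => out ++ [p ++ m]) acc = acc ++ q.map (fun m => p ++ m) := by
  induction q generalizing acc with
  | nil => simp
  | cons m t ih => simp [ih]

-- the outer foldl is a flatMap of pvQ
lemma foldlQ (u v : List Int) (n : Int) (L : List (Int × List Int)) (acc : List (List Int)) :
    L.foldl (fun out jp =>
      (if jp.1 = n - 1 ∧ 2 ≤ n then [v++u, u++u, u++v, v++v]
       else if jp.1 = n - 2 ∨ jp.1 = n - 1 then [u++u, u++v, v++v, v++u]
       else if PySem.Int.mod jp.1 2 = 0 then [u++u, u++v, v++v, v++u]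
       else [v++u, v++v, u++v, u++u]).foldl (fun out m => out ++ [jp.2 ++ m]) out) acc
    = acc ++ L.flatMap (pvQ u v n) := by
  induction L generalizing acc with
  | nil => simp
  | cons jp t ih =>
      rw [List.foldl_cons, List.flatMap_cons]
      rw [foldl_quad, ih]
      rw [List.append_assoc]
      rfl

lemma B_flatMap (path : List (List Int)) (u v : List Int) :
    createSquareTube_alt path u v
      = (PySem.List.enumerate path).flatMap (pvQ u v (path.length : Int)) := by
  simp only [createSquareTube_alt]
  exact foldlQ u v _ _ []

lemma mod2_shift (x : Int) : PySem.Int.mod (x + 2) 2 = PySem.Int.mod x 2 := by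
  rw [PySem.Int.mod_eq_emod_of_pos (by omega), PySem.Int.mod_eq_emod_of_pos (by omega)]
  omega

lemma pvQ_shift (u v : List Int) (n j : Int) (p : List Int) (hn : 4 ≤ n) :
    pvQ u v n (j + 2, p) = pvQ u v (n - 2) (j, p) := by
  have e1 : (j + 2 = n - 1 ∧ 2 ≤ n) ↔ (j = n - 2 - 1 ∧ 2 ≤ n - 2) := by omega
  have e2 : (j + 2 = n - 2 ∨ j + 2 = n - 1) ↔ (j = n - 2 - 2 ∨ j = n - 2 - 1) := by omega
  simp only [pvQ, e1, e2, mod2_shift j]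

lemma flat_shift (u v : List Int) (n : Int) (hn : 4 ≤ n) (L : List (List Int)) (s : Int) :
    (PySem.List.enumerate L (s + 2)).flatMap (pvQ u v n)
      = (PySem.List.enumerate L s).flatMap (pvQ u v (n - 2)) := by
  induction L generalizing s with
  | nil => simp [PySem.List.enumerate_nil]
  | cons a t ih =>
      simp only [PySem.List.enumerate_cons, List.flatMap_cons]
      rw [pvQ_shift u v n s a hn, show s + 2 + 1 = s + 1 + 2 by ring, ih (s + 1)]

lemma pvQ_head0 (u v a : List Int) (n : Int) (hn : 4 ≤ n) :
    pvQ u v n (0, a) = [a ++ (u ++ u), a ++ (u ++ v), a ++ (v ++ v), a ++ (v ++ u)] := by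
  simp only [pvQ]
  rw [if_neg (by omega), if_neg (by omega), if_pos (by decide)]
  rfl

lemma pvQ_head1 (u v b : List Int) (n : Int) (hn : 4 ≤ n) :
    pvQ u v n (1, b) = [b ++ (v ++ u), b ++ (v ++ v), b ++ (u ++ v), b ++ (u ++ u)] := by
  simp only [pvQ]
  rw [if_neg (by omega), if_neg (by omega), if_neg (by decide)]
  rfl

lemma B_step (u v a b : List Int) (rest : List (List Int)) (h : 2 ≤ rest.length) :
    createSquareTube_alt (a :: b :: rest) u v = pvBlock u v a b ++ createSquareTube_alt rest u v := by
  rw [B_flatMap, B_flatMap]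
  have hN : (((a :: b :: rest).length : Nat) : Int) = (rest.length : Int) + 2 := by
    simp; omega
  rw [hN]
  have hn : (4 : Int) ≤ (rest.length : Int) + 2 := by omega
  have henum : PySem.List.enumerate (a :: b :: rest) 0
      = (0, a) :: (1, b) :: PySem.List.enumerate rest 2 := by
    norm_num [PySem.List.enumerate_cons]
  rw [henum]
  simp only [List.flatMap_cons]
  rw [pvQ_head0 u v a _ hn, pvQ_head1 u v b _ hn]
  have hshift : (PySem.List.enumerate rest 2).flatMap (pvQ u v ((rest.length : Int) + 2))
      = (PySem.List.enumerate rest 0).flatMap (pvQ u v (rest.length : Int)) := by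
    have := flat_shift u v ((rest.length : Int) + 2) hn rest 0
    rw [show (0:Int) + 2 = 2 by ring] at this
    rw [this]
    norm_num
  rw [hshift]
  simp [pvBlock]

set_option maxHeartbeats 1600000 in
lemma main_eq (path : List (List Int)) (u v : List Int) :
    createSquareTube path u v = createSquareTube_alt path u v := by
  match path with
  | [] => rfl
  | [a] => rfl
  | [a, b] => rfl
  | [a, b, c] => rfl
  | a :: b :: c :: d :: t =>
      rw [A_step u v a b (c :: d :: t) (by simp), B_step u v a b (c :: d :: t) (by simp),
          main_eq (c :: d :: t) u v]
termination_by path.length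

-- ===== VERDICT (by name: the statement is the Claim_ definition above) =====
theorem createSquareTube_spec : Claim_equal_createSquareTube := by
  intro path u v _
  unfold Spec_createSquareTube
  exact main_eq path u v
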